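-- pv_equiv track=rewrite | github.com/renatokuipers/LMM-large-mind-model | agendev/src/agendev/UI/core_integration.py | generate_todo_markdown
-- ===== SOURCE A (Python) =====
-- from typing import Dict, List, Any, Tuple, Optional
--
-- def generate_todo_markdown(project_name: str, tasks: List[Dict[str, Any]]) -> str:
--     """
--     Generate todo.md content based on tasks.
--
--     Args:
--         project_name: Name of the project
--         tasks: List of task details
--
--     Returns:
--         Markdown content for todo.md
--     """
--     # Group tasks by status
--     planned_tasks = [t for t in tasks if t["status"] == "planned"]
--     in_progress_tasks = [t for t in tasks if t["status"] == "in_progress"]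
--     completed_tasks = [t for t in tasks if t["status"] == "completed"]
--
--     # Build Markdown content
--     markdown = f"# {project_name}\n\n"
--
--     if in_progress_tasks:
--         markdown += "## In Progress\n"
--         for task in in_progress_tasks:
--             markdown += f"- [ ] {task['title']}\n"
--         markdown += "\n"
--
--     if planned_tasks:
--         markdown += "## Planned\n"
--         for task in planned_tasks:
--             markdown += f"- [ ] {task['title']}\n"
--         markdown += "\n"
--
--     if completed_tasks:
--         markdown += "## Completed\n"
--         for task in completed_tasks:
--             markdown += f"- [x] {task['title']}\n"
--         markdown += "\n"
--
--     return markdown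
-- ===== SOURCE B (Python) =====
-- def generate_todo_markdown(project_name, tasks):
--     # One grouping pass, then one table-driven emit loop.
--     groups = {}
--     for t in tasks:
--         groups.setdefault(t["status"], []).append(t)
--     markdown = f"# {project_name}\n\n"
--     for status, header, prefix in (("in_progress", "## In Progress\n", "- [ ] "),
--                                    ("planned", "## Planned\n", "- [ ] "),
--                                    ("completed", "## Completed\n", "- [x] ")):
--         group = groups.get(status, [])
--         if group:
--             markdown += header
--             for task in group:
--                 markdown += f"{prefix}{task['title']}\n"
--             markdown += "\n"
--     return markdown
-- ===== Notes on version B (the rewrite author's own statement) =====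
-- stated objective: simpler
-- what changed: Replaces three separate filter passes over the task list plus three hardcoded emit blocks with a single grouping pass into a status-keyed dict and one table-driven emit loop over (status, header, prefix) triples.
import Mathlib
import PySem

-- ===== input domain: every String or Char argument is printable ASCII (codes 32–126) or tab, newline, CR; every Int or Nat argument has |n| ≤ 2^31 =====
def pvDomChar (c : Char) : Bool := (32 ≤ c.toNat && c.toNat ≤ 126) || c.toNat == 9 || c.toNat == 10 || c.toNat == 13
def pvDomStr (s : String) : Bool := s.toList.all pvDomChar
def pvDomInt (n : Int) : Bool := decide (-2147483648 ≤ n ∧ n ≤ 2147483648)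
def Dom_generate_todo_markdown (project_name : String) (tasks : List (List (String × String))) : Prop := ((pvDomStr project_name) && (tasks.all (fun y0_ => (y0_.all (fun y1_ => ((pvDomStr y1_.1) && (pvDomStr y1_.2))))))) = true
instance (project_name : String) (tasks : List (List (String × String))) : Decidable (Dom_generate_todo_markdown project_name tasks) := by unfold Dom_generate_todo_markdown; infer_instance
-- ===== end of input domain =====

-- B is a simpler decomposition: one grouping pass into a status-keyed dict plus one
-- table-driven emit loop, instead of three filter passes and three hardcoded blocks.
-- Equivalence is about the return value; neither program mutates its arguments.

-- Helpers shared by both ports: the Python dict reads t["status"] / t["title"].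
-- (Pre_ guarantees the key is present, so the "" default is never used on admitted inputs.)
def pvStatus (t : List (String × String)) : String := PySem.Dict.getD (PySem.Dict.mk t) "status" ""
def pvTitle (t : List (String × String)) : String := PySem.Dict.getD (PySem.Dict.mk t) "title" ""

-- ===== PORT A =====
def generate_todo_markdown (project_name : String) (tasks : List (List (String × String))) : String :=
  let planned_tasks := tasks.filter (fun t => pvStatus t == "planned")
  let in_progress_tasks := tasks.filter (fun t => pvStatus t == "in_progress")
  let completed_tasks := tasks.filter (fun t => pvStatus t == "completed")
  let markdown := "# " ++ project_name ++ "\n\n"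
  let markdown :=
    if in_progress_tasks ≠ [] then
      (in_progress_tasks.foldl (fun m task => m ++ ("- [ ] " ++ pvTitle task ++ "\n"))
        (markdown ++ "## In Progress\n")) ++ "\n"
    else markdown
  let markdown :=
    if planned_tasks ≠ [] then
      (planned_tasks.foldl (fun m task => m ++ ("- [ ] " ++ pvTitle task ++ "\n"))
        (markdown ++ "## Planned\n")) ++ "\n"
    else markdown
  let markdown :=
    if completed_tasks ≠ [] then
      (completed_tasks.foldl (fun m task => m ++ ("- [x] " ++ pvTitle task ++ "\n"))
        (markdown ++ "## Completed\n")) ++ "\n"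
    else markdown
  markdown

-- ===== PORT B =====
-- the (status, header, bullet-prefix) table of Source B
def pvTable : List (String × String × String) :=
  [("in_progress", "## In Progress\n", "- [ ] "),
   ("planned", "## Planned\n", "- [ ] "),
   ("completed", "## Completed\n", "- [x] ")]

def generate_todo_markdown_alt (project_name : String) (tasks : List (List (String × String))) : String :=
  let groups := tasks.foldl
    (fun (g : PySem.Dict String (List (List (String × String)))) t =>
      g.modify (pvStatus t) [] (· ++ [t]))     -- groups.setdefault(t["status"], []).append(t)
    PySem.Dict.empty
  pvTable.foldl
    (fun markdown e =>
      let group := groups.getD e.1 []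
      if group ≠ [] then
        (group.foldl (fun m task => m ++ (e.2.2 ++ pvTitle task ++ "\n")) (markdown ++ e.2.1)) ++ "\n"
      else markdown)
    ("# " ++ project_name ++ "\n\n")

-- ===== PRECONDITION & SPEC =====
-- Pre_ excludes exactly the inputs where Python A raises KeyError: a task without a
-- "status" key, or a task in one of the three emitted groups without a "title" key.
def Pre_generate_todo_markdown (project_name : String) (tasks : List (List (String × String))) : Prop :=
  ∀ t ∈ tasks,
    ((PySem.Dict.mk t).get? "status").isSome = true ∧
    (pvStatus t = "planned" ∨ pvStatus t = "in_progress" ∨ pvStatus t = "completed" →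
      ((PySem.Dict.mk t).get? "title").isSome = true)
instance (project_name : String) (tasks : List (List (String × String))) : Decidable (Pre_generate_todo_markdown project_name tasks) := by unfold Pre_generate_todo_markdown; infer_instance

def pvWitness_generate_todo_markdown : String × (List (List (String × String))) :=
  ("MyProject", [[("status", "planned"), ("title", "write docs")],
                 [("status", "completed"), ("title", "setup")]])

def Spec_generate_todo_markdown (project_name : String) (tasks : List (List (String × String))) (out : String) : Prop := out = generate_todo_markdown_alt project_name tasks
instance (project_name : String) (tasks : List (List (String × String))) (out : String) : Decidable (Spec_generate_todo_markdown project_name tasks out) := by unfold Spec_generate_todo_markdown; infer_instance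

-- ===== CLAIM (what is proved, stated in full; the proofs are below) =====
def Claim_equal_generate_todo_markdown : Prop := ∀ (project_name : String) (tasks : List (List (String × String))), Dom_generate_todo_markdown project_name tasks → Pre_generate_todo_markdown project_name tasks → Spec_generate_todo_markdown project_name tasks (generate_todo_markdown project_name tasks)

-- ===== LEMMAS AND PROOFS =====

-- The grouping fold of B, read back at key c, is exactly A's filter by status c.
theorem group_getD (tasks : List (List (String × String)))
    (d : PySem.Dict String (List (List (String × String)))) (c : String) :
    (tasks.foldl (fun g t => g.modify (pvStatus t) [] (· ++ [t])) d).getD c []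
      = d.getD c [] ++ tasks.filter (fun t => pvStatus t == c) := by
  induction tasks generalizing d with
  | nil => simp
  | cons a l ih =>
    simp only [List.foldl_cons, List.filter_cons, ih, PySem.Dict.getD_modify]
    by_cases h : pvStatus a = c
    · simp [h]
    · have h' : c ≠ pvStatus a := fun hc => h hc.symm
      simp [h, h']

-- ===== VERDICT (by name: the statement is the Claim_ definition above) =====
theorem generate_todo_markdown_spec : Claim_equal_generate_todo_markdown := by
  intro project_name tasks _ _
  unfold Spec_generate_todo_markdown generate_todo_markdown generate_todo_markdown_alt pvTable
  simp only [List.foldl_cons, List.foldl_nil, group_getD, PySem.Dict.getD_empty, List.nil_append]
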